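-- pv_equiv track=rewrite | github.com/1genadam/tileshop-rag | modules/aos_conversation_engine.py | _already_answered
-- ===== SOURCE A (Python) =====
-- from typing import Dict, List, Any, Optional
--
-- def _already_answered(question: str, gathered_info: Dict[str, Any]) -> bool:
--     """Check if we already have information that this question would gather"""
--     question_keywords = {
--         "color": ["color_scheme", "colors", "color_preferences", "cabinet_info", "countertop_info", "color_scheme_provided"],
--         "cabinet": ["cabinet_info", "color_scheme_provided", "has_detailed_design_info"],
--         "countertop": ["countertop_info", "color_scheme_provided", "has_detailed_design_info"],
--         "size": ["room_size", "square_feet", "dimensions"],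
--         "style": ["style", "design_preference", "style_preferences"],
--         "timeline": ["timeline", "start_date"],
--         "budget": ["budget", "price_range"],
--         "finish": ["finish", "matte", "polished", "finish_preferences"]
--     }
--
--     for keyword, info_keys in question_keywords.items():
--         if keyword in question.lower():
--             if any(key in gathered_info for key in info_keys):
--                 return True
--     return False
-- ===== SOURCE B (Python) =====
-- def _already_answered(question: str, gathered_info) -> bool:
--     """Check if we already have information that this question would gather"""
--     question_keywords = {
--         "color": ["color_scheme", "colors", "color_preferences", "cabinet_info", "countertop_info", "color_scheme_provided"],
--         "cabinet": ["cabinet_info", "color_scheme_provided", "has_detailed_design_info"],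
--         "countertop": ["countertop_info", "color_scheme_provided", "has_detailed_design_info"],
--         "size": ["room_size", "square_feet", "dimensions"],
--         "style": ["style", "design_preference", "style_preferences"],
--         "timeline": ["timeline", "start_date"],
--         "budget": ["budget", "price_range"],
--         "finish": ["finish", "matte", "polished", "finish_preferences"]
--     }
--     # invert the mapping: info_key -> keywords whose questions gather it
--     inverted = {}
--     for keyword, info_keys in question_keywords.items():
--         for key in info_keys:
--             inverted[key] = inverted.get(key, []) + [keyword]
--     lowered = question.lower()
--     for key in gathered_info:
--         for keyword in inverted.get(key, []):
--             if keyword in lowered: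
--                 return True
--     return False
-- ===== Notes on version B (the rewrite author's own statement) =====
-- stated objective: alternative
-- what changed: B inverts the keyword table into an info_key->keywords index built once, lowers the question once, and drives the search by iterating the gathered_info keys with index lookups, instead of A's scan over keywords with an inner membership scan of gathered_info per keyword.
import Mathlib
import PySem

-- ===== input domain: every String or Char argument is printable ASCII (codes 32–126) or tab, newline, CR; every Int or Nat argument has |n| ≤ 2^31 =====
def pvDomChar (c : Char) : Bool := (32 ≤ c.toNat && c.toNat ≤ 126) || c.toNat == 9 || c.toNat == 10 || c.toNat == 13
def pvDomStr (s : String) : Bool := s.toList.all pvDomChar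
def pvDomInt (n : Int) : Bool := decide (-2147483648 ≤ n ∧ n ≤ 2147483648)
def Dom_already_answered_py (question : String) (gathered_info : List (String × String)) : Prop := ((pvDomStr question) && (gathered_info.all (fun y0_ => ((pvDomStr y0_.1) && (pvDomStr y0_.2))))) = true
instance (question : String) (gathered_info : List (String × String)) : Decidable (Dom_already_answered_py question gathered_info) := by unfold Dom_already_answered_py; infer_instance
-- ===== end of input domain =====

-- B builds an inverted info_key -> keywords index once and iterates the gathered keys,
-- instead of A's keyword-by-keyword scan with an inner membership scan; alternative decomposition, same result.


-- the question_keywords dict literal (identical in both Pythons)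
def pvQuestionKeywords : List (String × List String) :=
  [("color", ["color_scheme", "colors", "color_preferences", "cabinet_info", "countertop_info", "color_scheme_provided"]),
   ("cabinet", ["cabinet_info", "color_scheme_provided", "has_detailed_design_info"]),
   ("countertop", ["countertop_info", "color_scheme_provided", "has_detailed_design_info"]),
   ("size", ["room_size", "square_feet", "dimensions"]),
   ("style", ["style", "design_preference", "style_preferences"]),
   ("timeline", ["timeline", "start_date"]),
   ("budget", ["budget", "price_range"]),
   ("finish", ["finish", "matte", "polished", "finish_preferences"])]

-- ===== PORT A =====
-- the 'for keyword, info_keys … return True … return False' loop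
def pvALoop (question : String) (gathered_info : List (String × String)) : List (String × List String) → Bool
  | [] => false
  | (keyword, infoKeys) :: rest =>
      if PySem.Str.isIn keyword (PySem.Str.lower question) then
        if infoKeys.any (fun key => gathered_info.any (fun p => p.1 == key)) then true
        else pvALoop question gathered_info rest
      else pvALoop question gathered_info rest

def already_answered_py (question : String) (gathered_info : List (String × String)) : Bool :=
  pvALoop question gathered_info pvQuestionKeywords

-- ===== PORT B =====
-- inverted = {}; for keyword, info_keys: for key in info_keys: inverted[key] = inverted.get(key, []) + [keyword]
def pvInverted : PySem.Dict String (List String) :=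
  pvQuestionKeywords.foldl
    (fun d p => p.2.foldl (fun d key => d.modify key [] (· ++ [p.1])) d)
    PySem.Dict.empty

-- for key in gathered_info: for keyword in inverted.get(key, []): if keyword in lowered: return True
def pvBLoop (lowered : String) : List (String × String) → Bool
  | [] => false
  | e :: rest =>
      if (pvInverted.getD e.1 []).any (fun keyword => PySem.Str.isIn keyword lowered) then true
      else pvBLoop lowered rest

def already_answered_py_alt (question : String) (gathered_info : List (String × String)) : Bool :=
  pvBLoop (PySem.Str.lower question) gathered_info

-- ===== PRECONDITION & SPEC =====
def Spec_already_answered_py (question : String) (gathered_info : List (String × String)) (out : Bool) : Prop := out = already_answered_py_alt question gathered_info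
instance (question : String) (gathered_info : List (String × String)) (out : Bool) : Decidable (Spec_already_answered_py question gathered_info out) := by unfold Spec_already_answered_py; infer_instance

-- ===== CLAIM (what is proved, stated in full; the proofs are below) =====
def Claim_equal_already_answered_py : Prop := ∀ (question : String) (gathered_info : List (String × String)), Dom_already_answered_py question gathered_info → Spec_already_answered_py question gathered_info (already_answered_py question gathered_info)

-- ===== LEMMAS AND PROOFS =====

-- the flattened edge list (info_key, keyword) of the keyword table
def pvEdges (tbl : List (String × List String)) : List (String × String) :=
  tbl.flatMap (fun p => p.2.map (fun k => (k, p.1)))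

lemma pvALoop_eq_any (q : String) (g : List (String × String)) (tbl : List (String × List String)) :
    pvALoop q g tbl
      = tbl.any (fun p => PySem.Str.isIn p.1 (PySem.Str.lower q)
          && p.2.any (fun key => g.any (fun e => e.1 == key))) := by
  induction tbl with
  | nil => rfl
  | cons hd rest ih =>
      obtain ⟨kw, keys⟩ := hd
      simp only [pvALoop, List.any_cons, ih]
      by_cases h1 : PySem.Str.isIn kw (PySem.Str.lower q) = true <;>
        by_cases h2 : keys.any (fun key => g.any (fun e => e.1 == key)) = true <;>
        simp [h2]

lemma pvBLoop_eq_any (lq : String) (g : List (String × String)) :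
    pvBLoop lq g
      = g.any (fun e => (pvInverted.getD e.1 []).any (fun kw => PySem.Str.isIn kw lq)) := by
  induction g with
  | nil => rfl
  | cons e rest ih =>
      simp only [pvBLoop, List.any_cons, ih]
      cases  (pvInverted.getD e.1 []).any (fun kw => PySem.Str.isIn kw lq) <;>
        simp only [Bool.false_eq_true, if_true, if_false, Bool.true_or, Bool.false_or]

lemma pvInverted_getD (k : String) :
    pvInverted.getD k []
      = ((pvEdges pvQuestionKeywords).filter (fun e => e.1 == k)).map (·.2) := by
  have h : pvInverted
      = (pvEdges pvQuestionKeywords).foldl (fun d e => d.modify e.1 [] (· ++ [e.2])) PySem.Dict.empty := by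
    simp only [pvInverted, pvEdges, List.foldl_flatMap, List.foldl_map]
  rw [h, PySem.Dict.getD_foldl_modify_append]
  simp

-- quantifier reordering: scanning the table then gathered_info equals scanning gathered_info then the inverted edges
lemma pvMain (tbl : List (String × List String)) (g : List (String × String)) (c : String → Bool) :
    tbl.any (fun p => c p.1 && p.2.any (fun key => g.any (fun e => e.1 == key)))
      = g.any (fun e => ((pvEdges tbl).filter (fun ed => ed.1 == e.1)).map (·.2) |>.any c) := by
  rw [Bool.eq_iff_iff]
  simp only [List.any_eq_true, List.any_map, pvEdges, List.mem_flatMap,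
    List.mem_map, Bool.and_eq_true, beq_iff_eq, List.any_filter, Function.comp]
  constructor
  · rintro ⟨p, hp, hc, key, hkey, e, he, heq⟩
    exact ⟨e, he, (key, p.1), ⟨p, hp, key, hkey, rfl⟩, heq.symm, hc⟩
  · rintro ⟨e, he, ed, ⟨p, hp, key, hkey, hed⟩, heq, hc⟩
    subst hed
    exact ⟨p, hp, hc, key, hkey, e, he, heq.symm⟩

-- ===== VERDICT (by name: the statement is the Claim_ definition above) =====
theorem already_answered_py_spec : Claim_equal_already_answered_py := by
  intro q g _
  show already_answered_py q g = already_answered_py_alt q g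
  rw [already_answered_py, already_answered_py_alt, pvALoop_eq_any, pvBLoop_eq_any,
    pvMain pvQuestionKeywords g (fun kw => PySem.Str.isIn kw (PySem.Str.lower q))]
  simp [pvInverted_getD]
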